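-- pv_equiv track=rewrite | github.com/TaeBbong/programmers-ps | test1.py | generate_possible_queries
-- ===== SOURCE A (Python) =====
-- def generate_possible_queries(lang, posi, care, food):
--     results = []
--     for l in [lang, '-']:
--         for p in [posi, '-']:
--             for c in [care, '-']:
--                 for f in [food, '-']:
--                     results.append(' '.join([l, p, c, f]))
--     return results
-- ===== SOURCE B (Python) =====
-- def generate_possible_queries(lang, posi, care, food):
--     def expand(tokens):
--         head, *rest = tokens
--         if not rest:
--             return [head, '-']
--         tails = expand(rest)
--         return [head + ' ' + t for t in tails] + ['- ' + t for t in tails]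
--     return expand([lang, posi, care, food])
-- ===== Notes on version B (the rewrite author's own statement) =====
-- stated objective: alternative
-- what changed: Replaces the four fixed nested loops with a recursive back-to-front construction: a recursion over the token list builds the list of suffix strings for the tail and doubles it by prefixing the head token or '-', so the output is assembled by structural recursion instead of iterated appends inside nested loops.
import Mathlib
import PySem

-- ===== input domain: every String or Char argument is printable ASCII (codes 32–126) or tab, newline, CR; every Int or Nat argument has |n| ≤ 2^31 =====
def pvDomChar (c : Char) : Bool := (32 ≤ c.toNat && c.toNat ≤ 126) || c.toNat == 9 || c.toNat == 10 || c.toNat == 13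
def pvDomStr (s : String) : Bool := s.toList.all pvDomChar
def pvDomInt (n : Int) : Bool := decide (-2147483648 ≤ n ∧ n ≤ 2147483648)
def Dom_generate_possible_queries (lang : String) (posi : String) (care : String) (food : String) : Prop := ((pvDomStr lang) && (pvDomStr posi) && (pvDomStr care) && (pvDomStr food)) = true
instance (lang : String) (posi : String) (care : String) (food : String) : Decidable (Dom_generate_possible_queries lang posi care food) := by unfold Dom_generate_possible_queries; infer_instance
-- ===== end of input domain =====

-- B replaces A's four nested loops with a structural recursion over the token list that builds the
-- suffix strings back-to-front, doubling the list at each level (objective: alternative, same cost).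

-- ===== PORT A =====
def generate_possible_queries (lang : String) (posi : String) (care : String) (food : String) : List String :=
  ([lang, "-"]).foldl (fun results l =>
    ([posi, "-"]).foldl (fun results p =>
      ([care, "-"]).foldl (fun results c =>
        ([food, "-"]).foldl (fun results f =>
          results ++ [PySem.Str.join " " [l, p, c, f]]) results) results) results) []

-- ===== PORT B =====
-- B's helper `expand`: recursion over the (nonempty) token list.
def pvExpand : List String → List String
  | [] => []                 -- unreachable in B (expand is only called on nonempty lists)
  | [h] => [h, "-"]
  | h :: t :: rest =>
      let tails := pvExpand (t :: rest)
      tails.map (fun s => h ++ " " ++ s) ++ tails.map (fun s => "-" ++ " " ++ s)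

def generate_possible_queries_alt (lang : String) (posi : String) (care : String) (food : String) : List String :=
  pvExpand [lang, posi, care, food]

-- ===== PRECONDITION & SPEC =====
def Spec_generate_possible_queries (lang : String) (posi : String) (care : String) (food : String) (out : List String) : Prop := out = generate_possible_queries_alt lang posi care food
instance (lang : String) (posi : String) (care : String) (food : String) (out : List String) : Decidable (Spec_generate_possible_queries lang posi care food out) := by unfold Spec_generate_possible_queries; infer_instance

-- ===== CLAIM (what is proved, stated in full; the proofs are below) =====
def Claim_equal_generate_possible_queries : Prop := ∀ (lang : String) (posi : String) (care : String) (food : String), Dom_generate_possible_queries lang posi care food → Spec_generate_possible_queries lang posi care food (generate_possible_queries lang posi care food)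

-- ===== LEMMAS AND PROOFS =====
-- ' '.join of exactly four strings is the corresponding chain of `++`.
theorem pv_join4 (a b c d : String) : PySem.Str.join " " [a,b,c,d] = a ++ " " ++ b ++ " " ++ c ++ " " ++ d := by
  rw [← String.toList_inj]
  simp [PySem.Str.toList_join, PySem.Chars.join, List.intercalate, List.intersperse]

-- ===== VERDICT (by name: the statement is the Claim_ definition above) =====
theorem generate_possible_queries_spec : Claim_equal_generate_possible_queries := by
  intro lang posi care food _
  unfold Spec_generate_possible_queries generate_possible_queries generate_possible_queries_alt
  simp [pvExpand, List.foldl, List.map, pv_join4, String.append_assoc]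
  refine ⟨?_,?_,?_,?_,?_,?_,?_,?_⟩ <;> (rw [← String.toList_inj]; simp)
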